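-- pv_equiv track=rewrite | github.com/klee1901/AoC25 | src/day9.py | getFirstLastPerimeter
-- ===== SOURCE A (Python) =====
-- def getFirstLastPerimeter(perimLines, last = False):
--     """
--     Inputs
--     ------
--     perimLines : dict{int : list[int]}
--         Coords of each perimeter vetex for each row or column
--     last : boolean
--         Get maximum perimeter location for each row or column (min otherwise)
--     Output
--     ------
--     dict{int : list[int]}
--         Coords of first/last perimeter for each column or row
--     """
--     linesWithPerim = [key for key in perimLines]
--     linesWithPerim.sort(reverse = last)
--     firstBorder = {}
--     for lineInd in linesWithPerim:
--         borders = perimLines[lineInd]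
--         for i in range(0,len(borders),2):
--             for j in range(borders[i],borders[i+1]+1):
--                 if j not in firstBorder:
--                     firstBorder[j] = lineInd
--     return firstBorder
-- ===== SOURCE B (Python) =====
-- def _add(covered, a, b):
--     """covered: sorted list of disjoint (lo, hi) intervals.
--     Returns (list of uncovered ints in [a, b] ascending, updated covered)."""
--     if b < a:
--         return [], covered
--     js = []
--     res = []
--     i = 0
--     while True:
--         if i == len(covered):
--             js.extend(range(a, b + 1))
--             res.append((a, b))
--             break
--         lo, hi = covered[i]
--         if b < lo:
--             js.extend(range(a, b + 1))
--             res.append((a, b))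
--             res.extend(covered[i:])
--             break
--         if hi < a:
--             res.append((lo, hi))
--             i += 1
--             continue
--         js.extend(range(a, lo))
--         if b <= hi:
--             res.append((min(a, lo), hi))
--             res.extend(covered[i + 1:])
--             break
--         res.append((min(a, lo), hi))
--         a = hi + 1
--         i += 1
--     return js, res
--
--
-- def getFirstLastPerimeter(perimLines, last=False):
--     out = []
--     covered = []  # merged coverage so far, as sorted disjoint intervals
--     for line in sorted(perimLines, reverse=last):
--         borders = perimLines[line]
--         for i in range(0, len(borders), 2):
--             js, covered = _add(covered, borders[i], borders[i + 1])
--             for j in js: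
--                 out.append((j, line))
--     return dict(out)
-- ===== Notes on version B (the rewrite author's own statement) =====
-- stated objective: faster
-- what changed: A probes the result dict for every single coordinate of every interval of every line; B keeps the already-covered coordinates as a sorted list of merged disjoint intervals and, per new interval, walks that list once to emit only the still-uncovered gap coordinates, so work on already-covered coordinates disappears.
import Mathlib
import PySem

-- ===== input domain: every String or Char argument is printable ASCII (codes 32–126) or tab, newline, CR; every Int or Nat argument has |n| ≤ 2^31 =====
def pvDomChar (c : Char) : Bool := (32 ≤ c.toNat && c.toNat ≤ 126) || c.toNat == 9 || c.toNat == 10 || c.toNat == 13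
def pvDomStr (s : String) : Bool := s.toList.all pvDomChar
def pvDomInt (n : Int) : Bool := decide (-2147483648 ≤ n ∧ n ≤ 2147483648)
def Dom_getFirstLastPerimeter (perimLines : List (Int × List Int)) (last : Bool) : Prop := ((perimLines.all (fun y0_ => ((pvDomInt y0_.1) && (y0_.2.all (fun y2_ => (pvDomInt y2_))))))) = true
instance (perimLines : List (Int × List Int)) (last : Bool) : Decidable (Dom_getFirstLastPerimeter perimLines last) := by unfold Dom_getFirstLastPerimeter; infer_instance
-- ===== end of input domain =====

-- B replaces A's per-coordinate scan (every coordinate of every interval checked against the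
-- result dict) by a merged set of already-covered intervals, filling only the uncovered gaps
-- of each new interval; objective: faster.

-- ===== PORT A =====
-- The List (Int × List Int) argument encodes the Python dict: both ports read it through
-- PySem.Dict.ofList (Python's dict(pairs): first-occurrence key order, last value).
def getFirstLastPerimeter (perimLines : List (Int × List Int)) (last : Bool) : List (Int × Int) :=
  let d := PySem.Dict.ofList perimLines
  let linesWithPerim := PySem.List.sorted d.keys (fun x => x) last
  (linesWithPerim.foldl (fun fb lineInd =>
      let borders := d.getD lineInd []
      (PySem.List.pyRange 0 (borders.length : Int) 2).foldl (fun fb i =>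
        (PySem.List.pyRange (PySem.List.pyGetD borders i 0)
                            (PySem.List.pyGetD borders (i + 1) 0 + 1) 1).foldl
          (fun fb j => if fb.contains j then fb else fb.insert j lineInd) fb) fb)
    PySem.Dict.empty).items

-- ===== PORT B =====
-- Source B's _add main loop: walk the sorted disjoint intervals, emit uncovered gaps of [a, b]
def pvAddIv : List (Int × Int) → Int → Int → (List Int × List (Int × Int))
  | [], a, b => (PySem.List.pyRange a (b + 1) 1, [(a, b)])
  | (lo, hi) :: rest, a, b =>
    if b < lo then (PySem.List.pyRange a (b + 1) 1, (a, b) :: (lo, hi) :: rest)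
    else if hi < a then
      let r := pvAddIv rest a b
      (r.1, (lo, hi) :: r.2)
    else if b ≤ hi then
      (PySem.List.pyRange a lo 1, (min a lo, hi) :: rest)
    else
      let r := pvAddIv rest (hi + 1) b
      (PySem.List.pyRange a lo 1 ++ r.1, (min a lo, hi) :: r.2)

def pvAdd (covered : List (Int × Int)) (a b : Int) : List Int × List (Int × Int) :=
  if b < a then ([], covered) else pvAddIv covered a b

def getFirstLastPerimeter_alt (perimLines : List (Int × List Int)) (last : Bool) : List (Int × Int) :=
  let d := PySem.Dict.ofList perimLines
  let st := (PySem.List.sorted d.keys (fun x => x) last).foldl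
    (fun (st : List (Int × Int) × List (Int × Int)) line =>
      let borders := d.getD line []
      (PySem.List.pyRange 0 (borders.length : Int) 2).foldl (fun st2 i =>
        let r := pvAdd st2.2 (PySem.List.pyGetD borders i 0) (PySem.List.pyGetD borders (i + 1) 0)
        (st2.1 ++ r.1.map (fun j => (j, line)), r.2)) st)
    ([], [])
  (PySem.Dict.ofList st.1).items

-- ===== PRECONDITION & SPEC =====
-- A raises IndexError exactly when some value list of the dict has odd length
-- (borders[i+1] past the end); Pre_ admits every other input.
def Pre_getFirstLastPerimeter (perimLines : List (Int × List Int)) (last : Bool) : Prop :=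
  ∀ p ∈ (PySem.Dict.ofList perimLines).items, Even p.2.length
instance (perimLines : List (Int × List Int)) (last : Bool) : Decidable (Pre_getFirstLastPerimeter perimLines last) := by unfold Pre_getFirstLastPerimeter; infer_instance

def pvWitness_getFirstLastPerimeter : (List (Int × List Int)) × Bool := ([(1, [3, 5]), (0, [4, 6])], false)

def Spec_getFirstLastPerimeter (perimLines : List (Int × List Int)) (last : Bool) (out : List (Int × Int)) : Prop := out = getFirstLastPerimeter_alt perimLines last
instance (perimLines : List (Int × List Int)) (last : Bool) (out : List (Int × Int)) : Decidable (Spec_getFirstLastPerimeter perimLines last out) := by unfold Spec_getFirstLastPerimeter; infer_instance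

-- ===== CLAIM (what is proved, stated in full; the proofs are below) =====
def Claim_equal_getFirstLastPerimeter : Prop := ∀ (perimLines : List (Int × List Int)) (last : Bool), Dom_getFirstLastPerimeter perimLines last → Pre_getFirstLastPerimeter perimLines last → Spec_getFirstLastPerimeter perimLines last (getFirstLastPerimeter perimLines last)

-- ===== LEMMAS AND PROOFS =====


-- proof-side view of the index loop 'range(0, len(borders), 2)': consecutive pairs
def pvPairs : List Int → List (Int × Int)
  | a :: b :: t => (a, b) :: pvPairs t
  | _ => []

-- j is inside one of the intervals
def pvCMem (C : List (Int × Int)) (j : Int) : Bool := C.any (fun p => p.1 ≤ j && j ≤ p.2)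

@[simp] theorem pvCMem_nil (j : Int) : pvCMem [] j = false := rfl

@[simp] theorem pvCMem_cons (lo hi : Int) (rest : List (Int × Int)) (j : Int) :
    pvCMem ((lo, hi) :: rest) j = ((decide (lo ≤ j) && decide (j ≤ hi)) || pvCMem rest j) := rfl

-- intervals sorted, pairwise disjoint, each nonempty
def pvSorted : List (Int × Int) → Prop
  | [] => True
  | (lo, hi) :: rest => lo ≤ hi ∧ (∀ p ∈ rest, hi < p.1) ∧ pvSorted rest

theorem pvCMem_lt (lo hi : Int) (rest : List (Int × Int)) (hs : pvSorted ((lo, hi) :: rest))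
    (j : Int) (hj : j < lo) : pvCMem ((lo, hi) :: rest) j = false := by
  obtain ⟨h1, h2, _⟩ := hs
  simp only [pvCMem, List.any_eq_false, Bool.and_eq_true, decide_eq_true_eq, not_and, List.mem_cons]
  rintro p (rfl | hp)
  · intro h; omega
  · intro h; have := h2 p hp; omega

theorem pvAddIv_lb (C : List (Int × Int)) (a b m : Int) (h1 : m < a)
    (h2 : ∀ p ∈ C, m < p.1) : ∀ p ∈ (pvAddIv C a b).2, m < p.1 := by
  induction C generalizing a with
  | nil =>
    simp only [pvAddIv, List.mem_singleton]
    rintro p rfl; exact h1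
  | cons q rest ih =>
    obtain ⟨lo, hi⟩ := q
    have hlo : m < lo := h2 (lo, hi) (List.mem_cons_self)
    have h2' : ∀ p ∈ rest, m < p.1 := fun p hp => h2 p (List.mem_cons_of_mem _ hp)
    simp only [pvAddIv]
    split_ifs with c1 c2 c3
    · rintro p hp
      rcases List.mem_cons.mp hp with rfl | hp'
      · exact h1
      · exact h2 p hp'
    · rintro p hp
      rcases List.mem_cons.mp hp with rfl | hp'
      · exact hlo
      · exact ih a h1 h2' p hp'
    · rintro p hp
      rcases List.mem_cons.mp hp with rfl | hp'
      · simp only; omega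
      · exact h2' p hp'
    · rintro p hp
      rcases List.mem_cons.mp hp with rfl | hp'
      · simp only; omega
      · exact ih (hi + 1) (by omega) h2' p hp'

-- uncovered part of [a, e-1] against a sorted list headed by (lo, hi), with lo < e ≤ hi+1
theorem pvFilter_head (lo hi : Int) (rest : List (Int × Int)) (hs : pvSorted ((lo, hi) :: rest))
    (a e : Int) (he1 : lo < e) (he2 : e ≤ hi + 1) :
    (PySem.List.pyRange a e 1).filter (fun j => !pvCMem ((lo, hi) :: rest) j)
      = PySem.List.pyRange a lo 1 := by
  obtain ⟨hlh, hlb, hrest⟩ := hs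
  by_cases h : lo ≤ a
  · rw [PySem.List.pyRange_one_eq_nil h]
    rw [List.filter_eq_nil_iff]
    intro j hj
    rw [PySem.List.mem_pyRange_one] at hj
    have hm : pvCMem ((lo, hi) :: rest) j = true := by
      simp only [pvCMem_cons]
      have h1 : (decide (lo ≤ j) && decide (j ≤ hi)) = true := by simp; omega
      simp [h1]
    simp [hm]
  · rw [PySem.List.pyRange_one_append a lo e (by omega) (by omega), List.filter_append]
    have hfirst : (PySem.List.pyRange a lo 1).filter (fun j => !pvCMem ((lo, hi) :: rest) j)
        = PySem.List.pyRange a lo 1 := by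
      rw [List.filter_eq_self]
      intro j hj
      rw [PySem.List.mem_pyRange_one] at hj
      rw [pvCMem_lt lo hi rest ⟨hlh, hlb, hrest⟩ j hj.2]
      rfl
    have hsecond : (PySem.List.pyRange lo e 1).filter (fun j => !pvCMem ((lo, hi) :: rest) j)
        = [] := by
      rw [List.filter_eq_nil_iff]
      intro j hj
      rw [PySem.List.mem_pyRange_one] at hj
      have hm : pvCMem ((lo, hi) :: rest) j = true := by
        simp only [pvCMem_cons]
        have h1 : (decide (lo ≤ j) && decide (j ≤ hi)) = true := by simp; omega
        simp [h1]
      simp [hm]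
    rw [hfirst, hsecond, List.append_nil]

theorem pvAddIv_spec (C : List (Int × Int)) (a b : Int) (hs : pvSorted C) (hab : a ≤ b) :
    (pvAddIv C a b).1
        = (PySem.List.pyRange a (b + 1) 1).filter (fun j => !pvCMem C j)
      ∧ pvSorted (pvAddIv C a b).2
      ∧ ∀ j, pvCMem (pvAddIv C a b).2 j
              = (pvCMem C j || (decide (a ≤ j) && decide (j ≤ b))) := by
  induction C generalizing a with
  | nil =>
    refine ⟨?_, ?_, ?_⟩
    · simp [pvAddIv]
    · simpa [pvAddIv, pvSorted] using hab
    · intro j; simp [pvAddIv]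
  | cons q rest ih =>
    obtain ⟨lo, hi⟩ := q
    obtain ⟨hlh, hlb, hrest⟩ := hs
    simp only [pvAddIv]
    split_ifs with c1 c2 c3
    · -- b < lo : everything uncovered
      refine ⟨?_, ?_, ?_⟩
      · dsimp only
        rw [List.filter_eq_self.mpr]
        intro j hj
        rw [PySem.List.mem_pyRange_one] at hj
        rw [pvCMem_lt lo hi rest ⟨hlh, hlb, hrest⟩ j (by omega)]
        rfl
      · refine ⟨hab, ?_, hlh, hlb, hrest⟩
        rintro p hp
        rcases List.mem_cons.mp hp with rfl | hp'
        · simpa using c1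
        · have := hlb p hp'; omega
      · intro j
        simp only [pvCMem_cons]
        rw [Bool.or_comm]
    · -- hi < a : interval strictly left of [a,b]
      obtain ⟨e1, e2, e3⟩ := ih a hrest hab
      refine ⟨?_, ?_, ?_⟩
      · dsimp only
        rw [e1]
        apply List.filter_congr
        intro j hj
        rw [PySem.List.mem_pyRange_one] at hj
        simp only [pvCMem_cons]
        have hf : decide (j ≤ hi) = false := by simp; omega
        simp [hf]
      · exact ⟨hlh, pvAddIv_lb rest a b hi c2 hlb, e2⟩
      · intro j
        dsimp only
        simp only [pvCMem_cons, e3 j, Bool.or_assoc]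
    · -- overlap, b ≤ hi : absorbed
      refine ⟨?_, ?_, ?_⟩
      · dsimp only
        rw [pvFilter_head lo hi rest ⟨hlh, hlb, hrest⟩ a (b + 1) (by omega) (by omega)]
      · exact ⟨by omega, hlb, hrest⟩
      · intro j
        dsimp only
        simp only [pvCMem_cons]
        cases hr : pvCMem rest j <;>
          simp only [Bool.or_false, Bool.or_true, Bool.true_or] <;>
          first
            | rfl
            | (rw [Bool.eq_iff_iff]
               simp only [Bool.or_eq_true, Bool.and_eq_true, decide_eq_true_eq, Bool.false_eq_true,
                 false_or, or_false]
               rw [Int.min_def]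
               split_ifs <;> omega)
    · -- overlap, hi < b : absorb and continue right of hi
      obtain ⟨e1, e2, e3⟩ := ih (hi + 1) hrest (by omega)
      refine ⟨?_, ?_, ?_⟩
      · dsimp only
        rw [PySem.List.pyRange_one_append a (hi + 1) (b + 1) (by omega) (by omega),
            List.filter_append,
            pvFilter_head lo hi rest ⟨hlh, hlb, hrest⟩ a (hi + 1) (by omega) (by omega)]
        congr 1
        rw [e1]
        apply List.filter_congr
        intro j hj
        rw [PySem.List.mem_pyRange_one] at hj
        simp only [pvCMem_cons]
        have hf : decide (j ≤ hi) = false := by simp; omega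
        simp [hf]
      · exact ⟨by omega, pvAddIv_lb rest (hi + 1) b hi (by omega) hlb, e2⟩
      · intro j
        dsimp only
        simp only [pvCMem_cons, e3 j]
        cases hr : pvCMem rest j <;>
          simp only [Bool.or_false, Bool.or_true, Bool.true_or] <;>
          first
            | rfl
            | (rw [Bool.eq_iff_iff]
               simp only [Bool.or_eq_true, Bool.and_eq_true, decide_eq_true_eq, Bool.false_eq_true,
                 false_or, or_false]
               rw [Int.min_def]
               split_ifs <;> omega)

theorem pvAdd_spec (C : List (Int × Int)) (a b : Int) (hs : pvSorted C) :
    (pvAdd C a b).1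
        = (PySem.List.pyRange a (b + 1) 1).filter (fun j => !pvCMem C j)
      ∧ pvSorted (pvAdd C a b).2
      ∧ ∀ j, pvCMem (pvAdd C a b).2 j
              = (pvCMem C j || (decide (a ≤ j) && decide (j ≤ b))) := by
  unfold pvAdd
  split_ifs with h
  · refine ⟨?_, hs, ?_⟩
    · rw [PySem.List.pyRange_one_eq_nil (by omega)]; rfl
    · intro j
      have h' : (decide (a ≤ j) && decide (j ≤ b)) = false := by
        simp only [Bool.and_eq_false_iff, decide_eq_false_iff_not]
        omega
      simp [h']
  · exact pvAddIv_spec C a b hs (by omega)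


theorem pvDictFold (d : PySem.Dict Int Int) (line : Int) (js : List Int) (hnd : js.Nodup) :
    (js.foldl (fun fb j => if fb.contains j then fb else fb.insert j line) d).items
      = d.items ++ (js.filter (fun j => !d.contains j)).map (fun j => (j, line)) := by
  induction js generalizing d with
  | nil => simp
  | cons j t ih =>
    rw [List.nodup_cons] at hnd
    simp only [List.foldl_cons, List.filter_cons]
    by_cases h : d.contains j = true
    · rw [if_pos h, ih d hnd.2]
      have hb : (!d.contains j) = false := by simp [h]
      rw [hb]
      simp
    · have h' : d.contains j = false := by simpa using h
      rw [if_neg h, ih (d.insert j line) hnd.2,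
          PySem.Dict.items_insert_of_not_contains d line h']
      have hfc : t.filter (fun j' => !(d.insert j line).contains j')
          = t.filter (fun j' => !d.contains j') := by
        apply List.filter_congr
        intro x hx
        rw [PySem.Dict.contains_insert]
        have hne : (x == j) = false := by
          simp only [beq_eq_false_iff_ne, ne_eq]
          exact fun e => hnd.1 (e ▸ hx)
        rw [hne, Bool.false_or]
      rw [hfc]
      have hb : (!d.contains j) = true := by simp [h']
      rw [hb]
      simp

theorem pvDictFold_contains (d : PySem.Dict Int Int) (line : Int) (js : List Int) (j' : Int) :
    ((js.foldl (fun fb j => if fb.contains j then fb else fb.insert j line) d).contains j')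
      = (d.contains j' || decide (j' ∈ js)) := by
  induction js generalizing d with
  | nil => simp
  | cons j t ih =>
    simp only [List.foldl_cons]
    rw [ih]
    have hstep : ((if d.contains j = true then d else d.insert j line).contains j')
        = (d.contains j' || (j' == j)) := by
      by_cases h : d.contains j = true
      · rw [if_pos h]
        by_cases hj : j' = j
        · subst hj; simp [h]
        · have : (j' == j) = false := by simpa using hj
          simp [this]
      · rw [if_neg h, PySem.Dict.contains_insert, Bool.or_comm]
    rw [hstep, Bool.or_assoc]
    congr 1
    rw [Bool.eq_iff_iff]
    simp [List.mem_cons]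

theorem pvRangeTwo (m : Nat) :
    PySem.List.pyRange 0 (2 * (m : Int)) 2 = (List.range m).map (fun k => ((2 * k : Nat) : Int)) := by
  rw [PySem.List.pyRange_of_pos _ _ (by norm_num)]
  rcases Nat.eq_zero_or_pos m with rfl | hm
  · simp
  · have hlt : (0 : Int) < 2 * (m : Int) := by positivity
    rw [if_pos hlt]
    have hdiv : ((2 * (m : Int) - 0 + 2 - 1) / 2).toNat = m := by omega
    rw [hdiv]
    apply List.map_congr_left
    intro k _
    push_cast
    ring

theorem pvFoldPairsNat {σ : Type} (m : Nat) (borders : List Int) (hlen : borders.length = m + m)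
    (f : σ → Int → Int → σ) (s : σ) :
    (List.range m).foldl (fun acc k => f acc (borders.getD (2 * k) 0) (borders.getD (2 * k + 1) 0)) s
      = (pvPairs borders).foldl (fun acc p => f acc p.1 p.2) s := by
  induction m generalizing borders s with
  | zero =>
    have hb : borders = [] := List.eq_nil_of_length_eq_zero (by omega)
    subst hb
    simp [pvPairs]
  | succ n ih =>
    match borders with
    | [] => simp at hlen
    | [x] => simp at hlen; omega
    | x :: y :: t =>
      have hlt : t.length = n + n := by simp at hlen; omega
      rw [List.range_succ_eq_map]
      simp only [List.foldl_cons, List.foldl_map]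
      have hfun : (fun (acc : σ) (k : Nat) =>
            f acc ((x :: y :: t).getD (2 * Nat.succ k) 0) ((x :: y :: t).getD (2 * Nat.succ k + 1) 0))
          = fun acc k => f acc (t.getD (2 * k) 0) (t.getD (2 * k + 1) 0) := by
        funext acc k
        have h2 : 2 * Nat.succ k = (2 * k + 1) + 1 := by omega
        rw [h2]
        simp only [List.getD_cons_succ]
      rw [show (2 * 0 : Nat) = 0 from rfl]
      rw [hfun]
      show (List.range n).foldl _ (f s ((x :: y :: t).getD 0 0) ((x :: y :: t).getD (0 + 1) 0)) = _
      rw [show ((x :: y :: t).getD 0 0) = x from rfl, show ((x :: y :: t).getD (0 + 1) 0) = y from rfl]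
      rw [show pvPairs (x :: y :: t) = (x, y) :: pvPairs t from rfl, List.foldl_cons]
      exact ih t hlt (f s x y)

theorem pvIndexFold {σ : Type} (borders : List Int) (h : Even borders.length)
    (f : σ → Int → Int → σ) (s : σ) :
    (PySem.List.pyRange 0 (borders.length : Int) 2).foldl
        (fun acc i => f acc (PySem.List.pyGetD borders i 0) (PySem.List.pyGetD borders (i + 1) 0)) s
      = (pvPairs borders).foldl (fun acc p => f acc p.1 p.2) s := by
  obtain ⟨m, hm⟩ := h
  have hc : (borders.length : Int) = 2 * (m : Int) := by rw [hm]; push_cast; ring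
  rw [hc, pvRangeTwo, List.foldl_map]
  have hfun : (fun (acc : σ) (k : Nat) =>
        f acc (PySem.List.pyGetD borders ((2 * k : Nat) : Int) 0)
              (PySem.List.pyGetD borders (((2 * k : Nat) : Int) + 1) 0))
      = fun acc k => f acc (borders.getD (2 * k) 0) (borders.getD (2 * k + 1) 0) := by
    funext acc k
    rw [PySem.List.pyGetD_natCast]
    rw [show ((2 * k : Nat) : Int) + 1 = ((2 * k + 1 : Nat) : Int) by push_cast; ring]
    rw [PySem.List.pyGetD_natCast]
  rw [hfun]
  exact pvFoldPairsNat m borders hm f s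

-- the invariant tying A's dict to B's (output list, covered intervals) state
def pvInv (d : PySem.Dict Int Int) (st : List (Int × Int) × List (Int × Int)) : Prop :=
  d.items = st.1 ∧ d.keys.Nodup ∧ (∀ j, d.contains j = pvCMem st.2 j) ∧ pvSorted st.2

theorem pvStepIv (d : PySem.Dict Int Int) (st : List (Int × Int) × List (Int × Int))
    (line a b : Int) (h : pvInv d st) :
    pvInv ((PySem.List.pyRange a (b + 1) 1).foldl
             (fun fb j => if fb.contains j then fb else fb.insert j line) d)
          (st.1 ++ (pvAdd st.2 a b).1.map (fun j => (j, line)), (pvAdd st.2 a b).2) := by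
  obtain ⟨hit, hnk, hc, hsrt⟩ := h
  obtain ⟨e1, e2, e3⟩ := pvAdd_spec st.2 a b hsrt
  have hjs : (PySem.List.pyRange a (b + 1) 1).filter (fun j => !d.contains j) = (pvAdd st.2 a b).1 := by
    rw [e1]
    apply List.filter_congr
    intro j _
    rw [hc j]
  have hitems : ((PySem.List.pyRange a (b + 1) 1).foldl
      (fun fb j => if fb.contains j then fb else fb.insert j line) d).items
      = st.1 ++ (pvAdd st.2 a b).1.map (fun j => (j, line)) := by
    rw [pvDictFold d line _ (PySem.List.nodup_pyRange_one a (b + 1)), hjs, hit]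
  refine ⟨hitems, ?_, ?_, e2⟩
  · show (((PySem.List.pyRange a (b + 1) 1).foldl
      (fun fb j => if fb.contains j then fb else fb.insert j line) d).items.map (·.1)).Nodup
    have hkeyeq : ((PySem.List.pyRange a (b + 1) 1).foldl
        (fun fb j => if fb.contains j then fb else fb.insert j line) d).items.map (·.1)
        = st.1.map (·.1) ++ (pvAdd st.2 a b).1 := by
      rw [hitems, List.map_append, List.map_map]
      congr 1
      have hcomp : ((fun (x : Int × Int) => x.1) ∘ fun (j : Int) => (j, line)) = fun j => j := by
        funext j; rfl
      rw [hcomp, List.map_id']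
    rw [hkeyeq, List.nodup_append]
    have hfst : st.1.map (·.1) = d.keys := by rw [← hit]; rfl
    refine ⟨?_, ?_, ?_⟩
    · rw [hfst]; exact hnk
    · rw [← hjs]
      exact (PySem.List.nodup_pyRange_one a (b + 1)).filter _
    · intro x hx1 y hy2 heq
      rw [hfst] at hx1
      rw [e1] at hy2
      subst heq
      have h2 := (List.mem_filter.mp hy2).2
      have hcx : d.contains x = true := by
        rw [PySem.Dict.contains_eq_decide_mem_keys]
        simpa using hx1
      rw [hc x] at hcx
      rw [hcx] at h2
      simp at h2
  · intro j
    rw [pvDictFold_contains, hc j, e3 j]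
    congr 1
    rw [Bool.eq_iff_iff]
    simp only [decide_eq_true_eq, Bool.and_eq_true, PySem.List.mem_pyRange_one]
    omega

theorem pvPairsFold (line : Int) (ps : List (Int × Int)) (d : PySem.Dict Int Int)
    (st : List (Int × Int) × List (Int × Int)) (h : pvInv d st) :
    pvInv (ps.foldl (fun fb p =>
             (PySem.List.pyRange p.1 (p.2 + 1) 1).foldl
               (fun fb j => if fb.contains j then fb else fb.insert j line) fb) d)
          (ps.foldl (fun st2 ab =>
             (st2.1 ++ (pvAdd st2.2 ab.1 ab.2).1.map (fun j => (j, line)), (pvAdd st2.2 ab.1 ab.2).2)) st) := by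
  induction ps generalizing d st with
  | nil => exact h
  | cons p t ih =>
    simp only [List.foldl_cons]
    exact ih _ _ (pvStepIv d st line p.1 p.2 h)

theorem pvOfListItems (ps : List (Int × Int)) (h : (ps.map Prod.fst).Nodup) :
    (PySem.Dict.ofList ps).items = ps := by
  show (ps.foldl (fun d p => d.insert p.1 p.2) PySem.Dict.empty).items = ps
  rw [PySem.Dict.items_foldl_insert_fresh ps Prod.fst Prod.snd PySem.Dict.empty
        (fun p _ => PySem.Dict.contains_empty p.1) h]
  rw [show (PySem.Dict.empty : PySem.Dict Int Int).items = [] from rfl, List.nil_append]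
  simp

theorem pvLinesFold (dd : PySem.Dict Int (List Int)) (ks : List Int)
    (hk : ∀ k ∈ ks, Even (dd.getD k []).length) (d : PySem.Dict Int Int)
    (st : List (Int × Int) × List (Int × Int)) (h : pvInv d st) :
    pvInv (ks.foldl (fun fb lineInd =>
             let borders := dd.getD lineInd []
             (PySem.List.pyRange 0 (borders.length : Int) 2).foldl (fun fb i =>
               (PySem.List.pyRange (PySem.List.pyGetD borders i 0)
                                   (PySem.List.pyGetD borders (i + 1) 0 + 1) 1).foldl
                 (fun fb j => if fb.contains j then fb else fb.insert j lineInd) fb) fb) d)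
          (ks.foldl (fun st2 line =>
             let borders := dd.getD line []
             (PySem.List.pyRange 0 (borders.length : Int) 2).foldl (fun st3 i =>
               let r := pvAdd st3.2 (PySem.List.pyGetD borders i 0) (PySem.List.pyGetD borders (i + 1) 0)
               (st3.1 ++ r.1.map (fun j => (j, line)), r.2)) st2) st) := by
  induction ks generalizing d st with
  | nil => exact h
  | cons k t ih =>
    simp only [List.foldl_cons]
    have hEv := hk k List.mem_cons_self
    have hk' : ∀ k' ∈ t, Even (dd.getD k' []).length := fun k' hk'' => hk k' (List.mem_cons_of_mem _ hk'')
    have hbrA := pvIndexFold (dd.getD k []) hEv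
      (fun fb u v => (PySem.List.pyRange u (v + 1) 1).foldl
        (fun fb j => if fb.contains j then fb else fb.insert j k) fb) d
    have hbrB := pvIndexFold (dd.getD k []) hEv
      (fun (st3 : List (Int × Int) × List (Int × Int)) u v =>
        (st3.1 ++ (pvAdd st3.2 u v).1.map (fun j => (j, k)), (pvAdd st3.2 u v).2)) st
    rw [hbrA, hbrB]
    exact ih hk' _ _ (pvPairsFold k (pvPairs (dd.getD k [])) d st h)

-- ===== VERDICT (by name: the statement is the Claim_ definition above) =====
theorem getFirstLastPerimeter_spec : Claim_equal_getFirstLastPerimeter := by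
  intro perimLines last hdom hpre
  unfold Spec_getFirstLastPerimeter
  unfold getFirstLastPerimeter getFirstLastPerimeter_alt
  simp only []
  have hk : ∀ k ∈ PySem.List.sorted (PySem.Dict.ofList perimLines).keys (fun x => x) last,
      Even ((PySem.Dict.ofList perimLines).getD k []).length := by
    intro k hks
    have hkk : k ∈ (PySem.Dict.ofList perimLines).keys := (PySem.List.mem_sorted _ _ _ _).mp hks
    cases hv : (PySem.Dict.ofList perimLines).get? k with
    | none =>
      exact absurd ((PySem.Dict.get?_eq_none_iff_not_mem_keys _ _).mp hv) (by simpa using hkk)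
    | some v =>
      rw [PySem.Dict.getD_of_get?_eq_some _ _ hv]
      exact hpre (k, v) (PySem.Dict.mem_items_of_get?_eq_some _ hv)
  have h0 : pvInv PySem.Dict.empty ([], []) := by
    refine ⟨rfl, PySem.Dict.nodup_keys_empty, ?_, trivial⟩
    intro j
    rw [PySem.Dict.contains_empty, pvCMem_nil]
  have hInv := pvLinesFold (PySem.Dict.ofList perimLines)
    (PySem.List.sorted (PySem.Dict.ofList perimLines).keys (fun x => x) last) hk
    PySem.Dict.empty ([], []) h0
  obtain ⟨hit, hnk, -, -⟩ := hInv
  rw [hit]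
  symm
  apply pvOfListItems
  rw [← hit]
  exact hnk
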